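-- pv_equiv track=rewrite | github.com/bismuts-werkeleien/AoC_2025 | day06/day06.py | solve_worksheet
-- ===== SOURCE A (Python) =====
-- import math
--
-- def multiply_p1(numbers, idx):
--     res = 1
--     for row in numbers:
--         res *= row[idx]
--     return res
--
-- def solve_worksheet(numbers, operations, part):
--     sums_p1 = [ sum(x) for x in zip(*numbers) ]
--     worksheet = []
--     for i, op in enumerate(operations):
--         if op == '+':
--             if part == 1:
--                 worksheet.append(sums_p1[i])
--             else:
--                 worksheet.append(sum(numbers[i]))
--         else:
--             if part == 1:
--                 worksheet.append(multiply_p1(numbers, i))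
--             else:
--                 worksheet.append(math.prod(numbers[i]))
--     return worksheet
-- ===== SOURCE B (Python) =====
-- import math
--
-- def solve_worksheet(numbers, operations, part):
--     grid = numbers if part != 1 else [list(col) for col in zip(*numbers)]
--     return [(sum if op == '+' else math.prod)(grid[i])
--             for i, op in enumerate(operations)]
-- ===== Notes on version B (the rewrite author's own statement) =====
-- stated objective: simpler
-- what changed: B builds the working grid once (transpose via zip(*numbers) for part 1, the rows themselves otherwise) and reduces each grid line with sum or math.prod in a single comprehension, removing A's eager column-sum table and the multiply_p1 per-op column scan.
-- outside the precondition, e.g. on solve_worksheet([], ['*'], 1): A returns [1], B raises IndexError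
import Mathlib
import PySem

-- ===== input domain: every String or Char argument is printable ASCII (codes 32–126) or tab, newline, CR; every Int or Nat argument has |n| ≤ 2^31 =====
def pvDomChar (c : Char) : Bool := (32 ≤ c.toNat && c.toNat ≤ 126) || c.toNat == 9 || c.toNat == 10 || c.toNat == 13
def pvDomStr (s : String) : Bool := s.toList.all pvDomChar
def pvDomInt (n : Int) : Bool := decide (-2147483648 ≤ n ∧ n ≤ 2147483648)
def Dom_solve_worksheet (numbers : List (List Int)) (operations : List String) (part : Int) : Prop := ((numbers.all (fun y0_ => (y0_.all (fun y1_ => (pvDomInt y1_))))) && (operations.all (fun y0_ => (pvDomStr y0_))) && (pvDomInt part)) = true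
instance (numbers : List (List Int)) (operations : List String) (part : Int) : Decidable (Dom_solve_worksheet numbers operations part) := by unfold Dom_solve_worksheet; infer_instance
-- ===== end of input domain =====

-- B builds the working grid once (transpose for part 1, the rows otherwise) and reduces each
-- grid line per op, replacing A's eager column-sum table + per-op column-product helper
-- (objective: simpler).  Both programs are pure; no argument is mutated.

-- ===== PORT A =====
-- A's use of Python's builtin zip(*numbers): peel one head off every row while all are nonempty
def zipStarA : List (List Int) → List (List Int)
  | [] => []
  | r :: rs =>
    if (r :: rs).any (fun x => x.isEmpty) then []
    else ((r :: rs).map (fun x => x.headD 0)) :: zipStarA (r.tail :: rs.map (fun x => x.tail))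
termination_by rows => (rows.headD []).length
decreasing_by
  rename_i h
  simp only [List.any_cons, Bool.or_eq_true, List.isEmpty_iff] at h
  rw [not_or] at h
  simp only [List.headD_cons]
  have : r ≠ [] := h.1
  cases r with
  | nil => exact absurd rfl this
  | cons a t => simp

def multiply_p1 (numbers : List (List Int)) (idx : Int) : Int :=
  numbers.foldl (fun res row => res * PySem.List.pyGetD row idx 0) 1

def solve_worksheet (numbers : List (List Int)) (operations : List String) (part : Int) : List Int :=
  let sums_p1 := (zipStarA numbers).map (fun x => x.sum)
  (PySem.List.enumerate operations 0).foldl (fun worksheet p =>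
    if p.2 = "+" then
      if part = 1 then worksheet ++ [PySem.List.pyGetD sums_p1 p.1 0]
      else worksheet ++ [(PySem.List.pyGetD numbers p.1 []).sum]
    else
      if part = 1 then worksheet ++ [multiply_p1 numbers p.1]
      else worksheet ++ [(PySem.List.pyGetD numbers p.1 []).prod]) []

-- ===== PORT B =====
-- B's use of Python's builtin zip(*rows): one column per index below the shortest row
def pyZipStar (rows : List (List Int)) : List (List Int) :=
  match rows with
  | [] => []
  | r :: rs =>
    (List.range (rs.foldl (fun m x => min m x.length) r.length)).map
      (fun j => (r :: rs).map (fun x => x.getD j 0))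

def solve_worksheet_alt (numbers : List (List Int)) (operations : List String) (part : Int) : List Int :=
  let grid := if part ≠ 1 then numbers else pyZipStar numbers
  (PySem.List.enumerate operations 0).map (fun p =>
    if p.2 = "+" then (PySem.List.pyGetD grid p.1 []).sum
    else (PySem.List.pyGetD grid p.1 []).prod)

-- ===== PRECONDITION & SPEC =====
-- Pre_ excludes the inputs on which A raises IndexError (an op index reaching past a row, or
-- past the shortest row for part 1), and the corner numbers = [] with part = 1 and a nonempty
-- operation list, where A's '+' raises while its per-row product over zero rows accidentally
-- returns 1 and B's transpose-indexing raises.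
def Pre_solve_worksheet (numbers : List (List Int)) (operations : List String) (part : Int) : Prop :=
  if part = 1 then
    operations = [] ∨ (numbers ≠ [] ∧ ∀ row ∈ numbers, operations.length ≤ row.length)
  else operations.length ≤ numbers.length
instance (numbers : List (List Int)) (operations : List String) (part : Int) : Decidable (Pre_solve_worksheet numbers operations part) := by unfold Pre_solve_worksheet; infer_instance

def pvWitness_solve_worksheet : List (List Int) × List String × Int := ([[1, 2], [3, 4]], (["+", "*"], 1))

def Spec_solve_worksheet (numbers : List (List Int)) (operations : List String) (part : Int) (out : List Int) : Prop := out = solve_worksheet_alt numbers operations part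
instance (numbers : List (List Int)) (operations : List String) (part : Int) (out : List Int) : Decidable (Spec_solve_worksheet numbers operations part out) := by unfold Spec_solve_worksheet; infer_instance

-- ===== CLAIM (what is proved, stated in full; the proofs are below) =====
def Claim_equal_solve_worksheet : Prop := ∀ (numbers : List (List Int)) (operations : List String) (part : Int), Dom_solve_worksheet numbers operations part → Pre_solve_worksheet numbers operations part → Spec_solve_worksheet numbers operations part (solve_worksheet numbers operations part)

-- ===== LEMMAS AND PROOFS =====

-- k is below a running minimum of row lengths
lemma lt_foldl_min (rs : List (List Int)) (k a : Nat) (ha : k < a)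
    (h : ∀ x ∈ rs, k < x.length) : k < rs.foldl (fun m x => min m x.length) a := by
  induction rs generalizing a with
  | nil => exact ha
  | cons x xs ih =>
    exact ih _ (lt_min ha (h x (by simp))) (fun y hy => h y (by simp [hy]))

-- the k-th column of B's zip, for k in range of every row
lemma pyZipStar_getD (rows : List (List Int)) (k : Nat) (hne : rows ≠ [])
    (h : ∀ r ∈ rows, k < r.length) :
    (pyZipStar rows).getD k [] = rows.map (fun r => r.getD k 0) := by
  match rows with
  | [] => exact absurd rfl hne
  | r :: rs =>
    have hk : k < rs.foldl (fun m x => min m x.length) r.length :=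
      lt_foldl_min rs k r.length (h r (by simp)) (fun x hx => h x (by simp [hx]))
    simp [pyZipStar, List.getD_eq_getElem?_getD, hk]

-- the k-th column of A's zip, for k in range of every row
lemma zipStarA_getD (k : Nat) (rows : List (List Int)) (hne : rows ≠ [])
    (h : ∀ r ∈ rows, k < r.length) :
    (zipStarA rows).getD k [] = rows.map (fun r => r.getD k 0) := by
  induction k generalizing rows with
  | zero =>
    match rows with
    | [] => exact absurd rfl hne
    | r :: rs =>
      have hguard : ((r :: rs).any (fun x => x.isEmpty)) = false := by
        simp only [List.any_eq_false, List.isEmpty_iff]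
        intro x hx
        exact List.ne_nil_of_length_pos (h x hx)
      rw [zipStarA, if_neg (by simp [hguard])]
      simp only [List.getD_cons_zero]
      apply List.map_congr_left
      intro x hx
      have hx0 : x ≠ [] := List.ne_nil_of_length_pos (h x hx)
      match x, hx0 with
      | a :: t, _ => rfl
  | succ n ih =>
    match rows with
    | [] => exact absurd rfl hne
    | r :: rs =>
      have hguard : ((r :: rs).any (fun x => x.isEmpty)) = false := by
        simp only [List.any_eq_false, List.isEmpty_iff]
        intro x hx
        exact List.ne_nil_of_length_pos (Nat.lt_of_le_of_lt (Nat.zero_le _) (h x hx))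
      rw [zipStarA, if_neg (by simp [hguard])]
      simp only [List.getD_cons_succ]
      have htails : ∀ t ∈ r.tail :: rs.map (fun x => x.tail), n < t.length := by
        intro t ht
        simp only [List.mem_cons, List.mem_map] at ht
        rcases ht with rfl | ⟨x, hx, rfl⟩
        · have := h r (by simp); simp [List.length_tail]; omega
        · have := h x (by simp [hx]); simp [List.length_tail]; omega
      rw [ih (r.tail :: rs.map (fun x => x.tail)) (by simp) htails]
      simp only [List.map_cons, List.map_map]
      congr 1
      · have hr : r ≠ [] := List.ne_nil_of_length_pos
          (Nat.lt_of_le_of_lt (Nat.zero_le _) (h r (by simp)))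
        match r, hr with
        | a :: t, _ => rfl
      · apply List.map_congr_left
        intro x hx
        have hx0 : x ≠ [] := List.ne_nil_of_length_pos
          (Nat.lt_of_le_of_lt (Nat.zero_le _) (h x (by simp [hx])))
        match x, hx0 with
        | a :: t, _ => rfl

lemma getD_map_sum (l : List (List Int)) (k : Nat) :
    (l.map (fun x => x.sum)).getD k 0 = (l.getD k []).sum := by
  cases h : l[k]? <;> simp [List.getD_eq_getElem?_getD, h]

lemma foldl_mul_getD (numbers : List (List Int)) (k : Nat) :
    numbers.foldl (fun res row => res * row.getD k 0) 1
      = (numbers.map (fun r => r.getD k 0)).prod := by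
  simp [List.prod_eq_foldl, List.foldl_map]

-- ===== VERDICT (by name: the statement is the Claim_ definition above) =====
theorem solve_worksheet_spec : Claim_equal_solve_worksheet := by
  intro numbers operations part _ hpre
  unfold Spec_solve_worksheet solve_worksheet solve_worksheet_alt
  simp only
  rw [show (fun (worksheet : List Int) (p : Int × String) =>
      if p.2 = "+" then
        if part = 1 then worksheet ++ [PySem.List.pyGetD ((zipStarA numbers).map (fun x => x.sum)) p.1 0]
        else worksheet ++ [(PySem.List.pyGetD numbers p.1 []).sum]
      else
        if part = 1 then worksheet ++ [multiply_p1 numbers p.1]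
        else worksheet ++ [(PySem.List.pyGetD numbers p.1 []).prod]) =
    (fun worksheet p => worksheet ++
      [if p.2 = "+" then
        if part = 1 then PySem.List.pyGetD ((zipStarA numbers).map (fun x => x.sum)) p.1 0
        else (PySem.List.pyGetD numbers p.1 []).sum
      else
        if part = 1 then multiply_p1 numbers p.1
        else (PySem.List.pyGetD numbers p.1 []).prod]) from by
    funext ws p; split_ifs <;> rfl]
  rw [PySem.List.foldl_append_singleton_eq_map, List.nil_append]
  apply List.map_congr_left
  intro p hp
  rw [PySem.List.mem_enumerate_iff] at hp
  obtain ⟨k, hk, rfl⟩ := hp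
  unfold Pre_solve_worksheet at hpre
  by_cases hpart : part = 1
  · -- part = 1: grid is the transpose; Pre gives k below every row length
    simp only [hpart, if_neg (by simp : ¬ (1 : Int) ≠ 1)] at *
    rcases hpre with hops | ⟨hne, hlen⟩
    · subst hops; simp at hk
    have hrow : ∀ r ∈ numbers, k < r.length := fun r hr => lt_of_lt_of_le hk (hlen r hr)
    have hcolB := pyZipStar_getD numbers k hne hrow
    have hcolA := zipStarA_getD k numbers hne hrow
    by_cases hop : operations[k] = "+"
    · simp only [hop, zero_add, PySem.List.pyGetD_natCast, getD_map_sum, hcolA, hcolB]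
      simp
    · simp only [hop, zero_add, PySem.List.pyGetD_natCast, hcolB,
        multiply_p1, foldl_mul_getD]
      simp
  · -- part ≠ 1: grid is numbers itself, branches coincide
    simp [hpart]
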